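-- pv_equiv track=rewrite | github.com/yogvidwankhede/PyGrep | python/pygrep.py | _match_class
-- ===== SOURCE A (Python) =====
-- def _match_class(c: str, class_expr: str, negated: bool = False) -> bool:
--     """
--     Evaluate whether character `c` belongs to a class expression.
--     Supports ranges like 'a-z'.
--     """
--     matched, i = False, 0
--     while i < len(class_expr):
--         if i + 2 < len(class_expr) and class_expr[i + 1] == "-":
--             if class_expr[i] <= c <= class_expr[i + 2]:
--                 matched = True
--                 break
--             i += 3
--         else:
--             if class_expr[i] == c:
--                 matched = True
--                 break
--             i += 1
--     return not matched if negated else matched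
-- ===== SOURCE B (Python) =====
-- def _match_class(c: str, class_expr: str, negated: bool = False) -> bool:
--     # Pass 1: parse the class expression into tokens.
--     tokens = []
--     i, n = 0, len(class_expr)
--     while i < n:
--         if i + 2 < n and class_expr[i + 1] == "-":
--             tokens.append(("range", class_expr[i], class_expr[i + 2]))
--             i += 3
--         else:
--             tokens.append(("char", class_expr[i]))
--             i += 1
--     # Pass 2: membership over the parsed tokens.
--     matched = any(
--         (t[1] <= c <= t[2]) if t[0] == "range" else (t[1] == c)
--         for t in tokens
--     )
--     return not matched if negated else matched
-- ===== Notes on version B (the rewrite author's own statement) =====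
-- stated objective: simpler
-- what changed: B splits A's fused scan-and-test while loop into a parse pass producing explicit range/char tokens followed by a separate any() membership pass over those tokens, keeping Python string comparison semantics.
import Mathlib
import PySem

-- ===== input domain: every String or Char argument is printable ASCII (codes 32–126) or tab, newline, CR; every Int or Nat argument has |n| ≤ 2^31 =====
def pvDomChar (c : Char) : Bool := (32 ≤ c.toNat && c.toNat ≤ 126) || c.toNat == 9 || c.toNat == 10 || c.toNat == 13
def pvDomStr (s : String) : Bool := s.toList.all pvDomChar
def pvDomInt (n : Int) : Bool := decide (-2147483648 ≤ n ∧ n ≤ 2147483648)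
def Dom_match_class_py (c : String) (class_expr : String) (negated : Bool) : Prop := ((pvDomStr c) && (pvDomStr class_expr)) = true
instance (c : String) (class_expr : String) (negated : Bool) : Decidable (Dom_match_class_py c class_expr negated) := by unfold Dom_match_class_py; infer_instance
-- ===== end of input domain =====

-- B parses the class expression into range/char tokens first and then does a separate
-- membership pass; A's fused scan-and-test loop is replaced by this two-pass decomposition (objective: simpler).

-- ===== PORT A =====
-- A's while loop: recursion on the remaining suffix of class_expr; the `i + 2 < len`
-- guard is "at least three characters remain"; str comparisons are Lean String </=/≤ (PySem-checked).
def matchClassLoopA (c : String) : List Char → Bool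
  | x :: d :: y :: rest =>
      if d = '-' then
        if String.ofList [x] ≤ c ∧ c ≤ String.ofList [y] then true else matchClassLoopA c rest
      else
        if String.ofList [x] = c then true else matchClassLoopA c (d :: y :: rest)
  | x :: rest => if String.ofList [x] = c then true else matchClassLoopA c rest
  | [] => false

def match_class_py (c : String) (class_expr : String) (negated : Bool) : Bool :=
  let matched := matchClassLoopA c class_expr.toList
  if negated then !matched else matched

-- ===== PORT B =====
-- Python tuples ("range", lo, hi) / ("char", ch) become this token type.
inductive ClassTok where
  | rng : Char → Char → ClassTok
  | chr : Char → ClassTok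
deriving DecidableEq, Repr

-- pass 1 of Source B: tokenize the class expression
def classTokens : List Char → List ClassTok
  | x :: d :: y :: rest =>
      if d = '-' then .rng x y :: classTokens rest
      else .chr x :: classTokens (d :: y :: rest)
  | x :: rest => .chr x :: classTokens rest
  | [] => []

-- pass 2 of Source B: any() over the tokens
def classTokMatches (c : String) : ClassTok → Bool
  | .rng lo hi => decide (String.ofList [lo] ≤ c ∧ c ≤ String.ofList [hi])
  | .chr x => String.ofList [x] == c

def match_class_py_alt (c : String) (class_expr : String) (negated : Bool) : Bool :=
  let matched := (classTokens class_expr.toList).any (classTokMatches c)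
  if negated then !matched else matched

-- ===== PRECONDITION & SPEC =====
def Spec_match_class_py (c : String) (class_expr : String) (negated : Bool) (out : Bool) : Prop := out = match_class_py_alt c class_expr negated
instance (c : String) (class_expr : String) (negated : Bool) (out : Bool) : Decidable (Spec_match_class_py c class_expr negated out) := by unfold Spec_match_class_py; infer_instance

-- ===== CLAIM (what is proved, stated in full; the proofs are below) =====
def Claim_equal_match_class_py : Prop := ∀ (c : String) (class_expr : String) (negated : Bool), Dom_match_class_py c class_expr negated → Spec_match_class_py c class_expr negated (match_class_py c class_expr negated)

-- ===== LEMMAS AND PROOFS =====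

-- A's fused loop equals B's tokenize-then-any, by induction following the loop's own shape.
theorem matchClassLoopA_eq_any (c : String) (cs : List Char) :
    matchClassLoopA c cs = (classTokens cs).any (classTokMatches c) := by
  induction cs using matchClassLoopA.induct c <;>
    simp_all [matchClassLoopA, classTokens, classTokMatches]

-- ===== VERDICT (by name: the statement is the Claim_ definition above) =====
theorem match_class_py_spec : Claim_equal_match_class_py := by
  intro c ce neg _
  unfold Spec_match_class_py match_class_py match_class_py_alt
  simp [matchClassLoopA_eq_any]
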